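-- pv_equiv track=rewrite | github.com/humblefoo02/ICPC-Tehran | F_suika.py | max_height_difference
-- ===== SOURCE A (Python) =====
-- def max_height_difference(heights):
--     # Sort the list of heights
--     heights.sort()
--
--     # This will store the optimal arrangement of guests
--     arranged = [0] * len(heights)
--
--     # Start filling from the middle of the arranged array
--     mid_index = len(heights) // 2
--     arranged[mid_index] = heights[0]
--
--     # Alternate placements from the sorted list
--     left = mid_index - 1
--     right = mid_index + 1
--     left_heights = True  # This flag helps alternate between placing to the left and right
--
--     for height in heights[1:]:
--         if left_heights:
--             if left >= 0:
--                 arranged[left] = height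
--                 left -= 1
--             else:
--                 arranged[right] = height
--                 right += 1
--         else:
--             if right < len(heights):
--                 arranged[right] = height
--                 right += 1
--             else:
--                 arranged[left] = height
--                 left -= 1
--         left_heights = not left_heights
--
--     # Compute the maximum height difference
--     max_diff = abs(arranged[0] - arranged[-1])
--     for i in range(1, len(arranged)):
--         max_diff = max(max_diff, abs(arranged[i] - arranged[i - 1]))
--
--     return max_diff
-- ===== SOURCE B (Python) =====
-- def max_height_difference(heights):
--     # Sorts `heights` in place (same observable mutation as the original).
--     heights.sort()
--     if len(heights) == 1:
--         return 0
--     best = heights[1] - heights[0]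
--     for i in range(len(heights) - 2):
--         best = max(best, heights[i + 2] - heights[i])
--     return best
-- ===== Notes on version B (the rewrite author's own statement) =====
-- stated objective: simpler
-- what changed: B never builds the alternating 'arranged' array: after sorting it takes the maximum of the first adjacent gap and all distance-2 gaps of the sorted list, exploiting that A's arrangement is the reversed odd-position elements, then the smallest, then the even-position elements, and that the gap between the arrangement's two ends never exceeds a distance-2 gap. Pre_ excludes only the empty list, on which both implementations raise IndexError.
import Mathlib
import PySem

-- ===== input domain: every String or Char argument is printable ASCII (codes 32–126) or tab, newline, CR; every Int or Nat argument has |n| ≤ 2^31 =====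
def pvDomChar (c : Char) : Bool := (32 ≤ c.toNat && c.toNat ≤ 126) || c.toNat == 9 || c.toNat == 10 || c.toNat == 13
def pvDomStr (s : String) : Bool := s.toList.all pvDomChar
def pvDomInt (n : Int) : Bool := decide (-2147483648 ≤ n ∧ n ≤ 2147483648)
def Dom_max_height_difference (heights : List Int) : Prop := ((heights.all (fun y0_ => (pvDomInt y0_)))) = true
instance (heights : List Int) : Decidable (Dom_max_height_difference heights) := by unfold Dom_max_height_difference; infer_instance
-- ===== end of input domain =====

-- B drops A's 'arranged' array entirely and reads the answer off the sorted list
-- (objective: simpler).  Both the Python A and the Python B sort 'heights' in place;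
-- the theorems below are about the RETURN value.

-- ===== PORT A =====
-- Step of A's placement loop.  The two fall-back branches (left < 0, right ≥ n) are
-- transliterated as in the source; pySetD is Python's arranged[i] = h.
def arrangeStep (n : Int) (s : List Int × Int × Int × Bool) (height : Int) :
    List Int × Int × Int × Bool :=
  let arr := s.1; let left := s.2.1; let right := s.2.2.1; let leftHeights := s.2.2.2
  if leftHeights then
    if 0 ≤ left then (PySem.List.pySetD arr left height, left - 1, right, false)
    else (PySem.List.pySetD arr right height, left, right + 1, false)
  else
    if right < n then (PySem.List.pySetD arr right height, left, right + 1, true)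
    else (PySem.List.pySetD arr left height, left - 1, right, true)

-- everything A does after the in-place sort
def abody (hs : List Int) : Int :=
  let n : Int := hs.length
  let arranged := List.replicate hs.length (0 : Int)
  let mid : Int := PySem.Int.floordiv n 2
  let arranged := PySem.List.pySetD arranged mid (PySem.List.pyGetD hs 0 0)  -- heights[0]; Pre_ excludes []
  let st := (PySem.List.slice hs (some 1) none).foldl (arrangeStep n) (arranged, mid - 1, mid + 1, true)
  let arr := st.1
  let maxDiff := |PySem.List.pyGetD arr 0 0 - PySem.List.pyGetD arr (-1) 0|
  (PySem.List.pyRange 1 n 1).foldl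
    (fun m i => max m |PySem.List.pyGetD arr i 0 - PySem.List.pyGetD arr (i - 1) 0|) maxDiff

def max_height_difference (heights : List Int) : Int :=
  abody (PySem.List.sorted heights (fun x => x) false)

-- ===== PORT B =====
-- everything B does after the in-place sort
def bbody (hs : List Int) : Int :=
  if hs.length = 1 then 0
  else
    let best := PySem.List.pyGetD hs 1 0 - PySem.List.pyGetD hs 0 0
    (PySem.List.pyRange 0 ((hs.length : Int) - 2) 1).foldl
      (fun best i => max best (PySem.List.pyGetD hs (i + 2) 0 - PySem.List.pyGetD hs i 0)) best

def max_height_difference_alt (heights : List Int) : Int :=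
  bbody (PySem.List.sorted heights (fun x => x) false)

-- ===== PRECONDITION & SPEC =====
-- Pre_ excludes only the empty list, on which both Pythons raise IndexError.
def Pre_max_height_difference (heights : List Int) : Prop := heights ≠ []
instance (heights : List Int) : Decidable (Pre_max_height_difference heights) := by
  unfold Pre_max_height_difference; infer_instance
def pvWitness_max_height_difference : List Int := [3, 1, 2]

def Spec_max_height_difference (heights : List Int) (out : Int) : Prop := out = max_height_difference_alt heights
instance (heights : List Int) (out : Int) : Decidable (Spec_max_height_difference heights out) := by unfold Spec_max_height_difference; infer_instance

-- ===== CLAIM (what is proved, stated in full; the proofs are below) =====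
def Claim_equal_max_height_difference : Prop := ∀ (heights : List Int), Dom_max_height_difference heights → Pre_max_height_difference heights → Spec_max_height_difference heights (max_height_difference heights)

-- ===== LEMMAS AND PROOFS =====

-- every-other element, starting at the head
def eo : List Int → List Int
  | [] => []
  | [a] => [a]
  | a :: _ :: t => a :: eo t

-- consecutive gaps (b - a) of a list
def gaps : List Int → List Int
  | a :: b :: t => (b - a) :: gaps (b :: t)
  | _ => []

-- consecutive gaps with abs, as A's final pass computes them
def agaps : List Int → List Int
  | a :: b :: t => |b - a| :: agaps (b :: t)
  | _ => []

-- distance-2 gaps, as B computes them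
def g2 : List Int → List Int
  | a :: b :: c :: t => (c - a) :: g2 (b :: c :: t)
  | _ => []

theorem eo_cons (h : Int) (t : List Int) : eo (h :: t) = h :: eo t.tail := by
  cases t <;> simp [eo]

theorem eo_length (l : List Int) : (eo l).length = (l.length + 1) / 2 := by
  induction l using eo.induct with
  | case1 => simp [eo]
  | case2 a => simp [eo]
  | case3 a b t ih => simp [eo, ih]; omega

theorem eo_ne_nil {l : List Int} (h : l ≠ []) : eo l ≠ [] := by
  have := eo_length l
  intro hc
  rw [hc] at this
  simp at this
  rcases l with _ | ⟨x, t⟩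
  · exact h rfl
  · simp at this; omega

theorem eo_sublist (l : List Int) : (eo l).Sublist l := by
  induction l using eo.induct with
  | case1 => simp [eo]
  | case2 a => simp [eo]
  | case3 a b t ih =>
      simp only [eo]
      exact (ih.cons b).cons₂ a

theorem getLastD_irrel (l : List Int) (h : l ≠ []) (d d' : Int) :
    l.getLastD d = l.getLastD d' := by
  cases l with
  | nil => exact absurd rfl h
  | cons a m => rw [List.getLastD_cons, List.getLastD_cons]

theorem getD_irrel (l : List Int) (k : Nat) (h : k < l.length) (d d' : Int) :
    l.getD k d = l.getD k d' := by
  rw [List.getD_eq_getElem l d h, List.getD_eq_getElem l d' h]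

-- the last element of eo l sits at the last index of l's parity
theorem eo_getLastD (l : List Int) (h : l ≠ []) : ∀ d : Int,
    (eo l).getLastD d = if l.length % 2 = 1 then l.getD (l.length - 1) d else l.getD (l.length - 2) d := by
  induction l using eo.induct with
  | case1 => exact absurd rfl h
  | case2 a => intro d; simp [eo]
  | case3 a b t ih =>
      intro d
      cases t with
      | nil => simp [eo]
      | cons c u =>
          rw [show eo (a :: b :: c :: u) = a :: eo (c :: u) from rfl, List.getLastD_cons,
              ih (by simp) a]
          set L := (c :: u).length with hL
          have hL1 : 1 ≤ L := by rw [hL]; simp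
          have hlen : (a :: b :: c :: u).length = L + 2 := by
            simp only [hL, List.length_cons]
          by_cases hp : L % 2 = 1
          · rw [if_pos hp, if_pos (by omega : (a :: b :: c :: u).length % 2 = 1)]
            have e : (a :: b :: c :: u).length - 1 = (L - 1) + 1 + 1 := by omega
            rw [e, List.getD_cons_succ, List.getD_cons_succ]
            exact getD_irrel _ _ (by omega) _ _
          · rw [if_neg hp, if_neg (by omega : ¬ (a :: b :: c :: u).length % 2 = 1)]
            have hL2 : 2 ≤ L := by omega
            have e : (a :: b :: c :: u).length - 2 = (L - 2) + 1 + 1 := by omega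
            rw [e, List.getD_cons_succ, List.getD_cons_succ]
            exact getD_irrel _ _ (by omega) _ _

theorem getLastD_append_right (xs ys : List Int) (hy : ys ≠ []) : ∀ d : Int,
    (xs ++ ys).getLastD d = ys.getLastD d := by
  induction xs with
  | nil => intro d; rfl
  | cons x xs' ih =>
      intro d
      rw [List.cons_append, List.getLastD_cons, ih x]
      exact getLastD_irrel _ hy _ _

theorem getLastD_eq_getD (l : List Int) : ∀ d : Int, l.getLastD d = l.getD (l.length - 1) d := by
  induction l with
  | nil => intro d; rfl
  | cons a m ih =>
      intro d
      cases m with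
      | nil => rfl
      | cons b m' =>
          rw [List.getLastD_cons, ih a]
          rw [show (a :: b :: m').length - 1 = ((b :: m').length - 1) + 1 by simp, List.getD_cons_succ]
          exact getD_irrel _ _ (by simp) _ _

theorem set_replicate_split (n m : Nat) (h : Int) (hm : m < n) :
    (List.replicate n (0 : Int)).set m h
      = List.replicate m 0 ++ h :: List.replicate (n - 1 - m) 0 := by
  have hn : n = m + (n - m) := by omega
  rw [hn, List.replicate_add, List.set_append_right m h (by simp)]
  have h2 : n - m = 1 + (n - m - 1) := by omega
  rw [h2, List.replicate_add]
  simp [List.replicate_succ]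
  omega

theorem set_left (a : Nat) (rest : List Int) (h : Int) (ha : 1 ≤ a) :
    (List.replicate a (0 : Int) ++ rest).set (a - 1) h
      = List.replicate (a - 1) 0 ++ h :: rest := by
  obtain ⟨a', rfl⟩ : ∃ a', a = a' + 1 := ⟨a - 1, by omega⟩
  simp only [Nat.add_sub_cancel]
  rw [List.replicate_add, List.append_assoc, List.set_append_right a' h (by simp)]
  simp [List.replicate_succ]

theorem set_right (a : Nat) (core : List Int) (b : Nat) (h : Int) (hb : 1 ≤ b) :
    (List.replicate a (0 : Int) ++ core ++ List.replicate b 0).set (a + core.length) h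
      = List.replicate a 0 ++ (core ++ [h]) ++ List.replicate (b - 1) 0 := by
  obtain ⟨b', rfl⟩ : ∃ b', b = b' + 1 := ⟨b - 1, by omega⟩
  rw [List.append_assoc, List.set_append_right (a + core.length) h (by simp)]
  simp only [List.length_replicate, Nat.add_sub_cancel_left]
  rw [List.set_append_right core.length h (by omega)]
  simp [List.replicate_succ]

-- invariant of A's placement loop: it fills the zero padding on the left with eo
-- of the remaining elements (reversed) and the padding on the right with the rest
theorem arrange_inv (l : List Int) : ∀ (core : List Int) (flag : Bool) (a b : Nat) (n : Int),
    a = (eo (cond flag l l.tail)).length →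
    b = (eo (cond flag l.tail l)).length →
    n = (a : Int) + core.length + b →
    (l.foldl (arrangeStep n)
        (List.replicate a 0 ++ core ++ List.replicate b 0, (a : Int) - 1, (a : Int) + core.length, flag)).1
      = (eo (cond flag l l.tail)).reverse ++ core ++ eo (cond flag l.tail l) := by
  induction l with
  | nil =>
      intro core flag a b n ha hb hn
      cases flag <;> simp [eo] at ha hb <;> subst ha <;> subst hb <;> simp [eo]
  | cons h t ih =>
      intro core flag a b n ha hb hn
      cases flag
      · -- flag = false : place to the right
        simp only [Bool.cond_false, List.tail_cons] at ha hb ⊢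
        rw [eo_cons] at hb
        have hb1 : 1 ≤ b := by simp [hb]
        have hlt : (a : Int) + core.length < n := by rw [hn]; omega
        have htn : ((a : Int) + core.length) = ((a + core.length : Nat) : Int) := by push_cast; ring
        simp only [List.foldl_cons, arrangeStep, Bool.false_eq_true, if_false, if_pos hlt]
        rw [htn, PySem.List.pySetD_natCast, set_right a core b h hb1]
        have e2 : ((a + core.length : Nat) : Int) + 1 = (a : Int) + ((core ++ [h]).length : Int) := by
          simp; push_cast; ring
        rw [e2]
        have := ih (core ++ [h]) true a (b - 1) n
          (by simpa using ha)
          (by simp [hb])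
          (by simp at hn ⊢; push_cast at hn ⊢; omega)
        simp only [Bool.cond_true, List.tail_cons] at this
        rw [this, eo_cons]
        simp [List.append_assoc]
      · -- flag = true : place to the left
        simp only [Bool.cond_true, List.tail_cons] at ha hb ⊢
        rw [eo_cons] at ha
        have ha1 : 1 ≤ a := by simp [ha]
        have hge : (0 : Int) ≤ (a : Int) - 1 := by omega
        have htn : ((a : Int) - 1) = ((a - 1 : Nat) : Int) := by omega
        simp only [List.foldl_cons, arrangeStep, reduceIte, if_pos hge]
        rw [List.append_assoc]
        rw [htn, PySem.List.pySetD_natCast, set_left a (core ++ List.replicate b 0) h ha1]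
        have e2 : ((a : Nat) : Int) + (core.length : Int) = ((a - 1 : Nat) : Int) + (((h :: core).length : Nat) : Int) := by
          simp; omega
        rw [e2]
        have := ih (h :: core) false (a - 1) b n
          (by simp [ha])
          (by simpa using hb)
          (by simp at hn ⊢; push_cast at hn ⊢; omega)
        simp only [Bool.cond_false, List.tail_cons] at this
        rw [show List.replicate (a - 1) (0 : Int) ++ h :: (core ++ List.replicate b 0)
              = List.replicate (a - 1) 0 ++ (h :: core) ++ List.replicate b 0 by simp]
        rw [this, eo_cons]
        simp [List.append_assoc]

-- A's arranged array, in closed form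
theorem arranged_eq (h0 : Int) (t : List Int) :
    ((PySem.List.slice (h0 :: t) (some 1) none).foldl
       (arrangeStep ((h0 :: t).length : Int))
       (PySem.List.pySetD (List.replicate (h0 :: t).length (0 : Int))
          (PySem.Int.floordiv ((h0 :: t).length : Int) 2)
          (PySem.List.pyGetD (h0 :: t) 0 0),
        PySem.Int.floordiv ((h0 :: t).length : Int) 2 - 1,
        PySem.Int.floordiv ((h0 :: t).length : Int) 2 + 1, true)).1
      = (eo t).reverse ++ h0 :: eo t.tail := by
  have hsl : PySem.List.slice (h0 :: t) (some 1) none = t := by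
    simp [PySem.List.slice_from_one]
  have ha2 : (eo t).length = (t.length + 1) / 2 := eo_length t
  have htl : t.tail.length = t.length - 1 := by cases t <;> simp
  have hb2 : (eo t.tail).length = t.length / 2 := by rw [eo_length, htl]; omega
  have hmid : PySem.Int.floordiv (((h0 :: t).length : Nat) : Int) 2 = ((eo t).length : Int) := by
    rw [PySem.Int.floordiv_eq_ediv_of_pos (by norm_num)]
    rw [show (2 : Int) = ((2 : Nat) : Int) by norm_num, ← Int.natCast_div]
    simp [ha2]
  have hset : PySem.List.pySetD (List.replicate (h0 :: t).length (0 : Int))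
      (((eo t).length : Nat) : Int) (PySem.List.pyGetD (h0 :: t) 0 0)
      = List.replicate (eo t).length 0 ++ [h0] ++ List.replicate (eo t.tail).length 0 := by
    rw [PySem.List.pySetD_natCast, PySem.List.pyGetD_zero_cons,
        set_replicate_split _ _ _ (by simp; omega)]
    simp only [List.length_cons]
    rw [show t.length + 1 - 1 - (eo t).length = (eo t.tail).length by omega]
    simp
  rw [hsl, hmid, hset]
  have := arrange_inv t [h0] true (eo t).length (eo t.tail).length (((h0 :: t).length : Nat) : Int)
    (by simp) (by simp) (by simp; omega)
  simp only [Bool.cond_true, List.length_cons] at this ⊢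
  simpa using this

theorem pyGetD_cons_succ (x : Int) (l : List Int) (i : Int) (hi : 0 ≤ i) :
    PySem.List.pyGetD (x :: l) (i + 1) 0 = PySem.List.pyGetD l i 0 := by
  obtain ⟨k, rfl⟩ : ∃ k : Nat, i = (k : Int) := ⟨i.toNat, by omega⟩
  rw [show (k : Int) + 1 = ((k + 1 : Nat) : Int) by push_cast; ring]
  rw [PySem.List.pyGetD_natCast, PySem.List.pyGetD_natCast, List.getD_cons_succ]

theorem pyRange_shift (a b : Int) :
    PySem.List.pyRange (a + 1) (b + 1) 1 = (PySem.List.pyRange a b 1).map (· + 1) := by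
  rw [PySem.List.pyRange_one, PySem.List.pyRange_one, List.map_map,
      show b + 1 - (a + 1) = b - a by ring]
  apply List.map_congr_left
  intro k _
  simp
  ring

-- fold over indices 1..len-1 of |arr[i]-arr[i-1]|  =  fold max over agaps
theorem foldA (x : Int) (arr : List Int) : ∀ s : Int,
    (PySem.List.pyRange 1 ((x :: arr).length : Int) 1).foldl
        (fun m i => max m |PySem.List.pyGetD (x :: arr) i 0 - PySem.List.pyGetD (x :: arr) (i - 1) 0|) s
      = (agaps (x :: arr)).foldl max s := by
  induction arr generalizing x with
  | nil =>
      intro s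
      rw [show ((([x] : List Int).length : Nat) : Int) = 1 by simp,
          PySem.List.pyRange_one_eq_nil (by omega)]
      simp [agaps]
  | cons y t ih =>
      intro s
      have hlen : (((x :: y :: t).length : Nat) : Int) = (t.length : Int) + 2 := by simp; push_cast; ring
      rw [hlen, PySem.List.pyRange_one_cons (by omega), List.foldl_cons]
      rw [show ((t.length : Int) + 2) = ((t.length : Int) + 1) + 1 by ring,
          show (1 : Int) + 1 = (0 : Int) + 1 + 1 by ring,
          pyRange_shift, List.foldl_map]
      rw [PySem.List.foldl_congr_mem _ _
            (fun m i => max m |PySem.List.pyGetD (y :: t) i 0 - PySem.List.pyGetD (y :: t) (i - 1) 0|) _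
            (by
              intro acc i hi
              rw [PySem.List.mem_pyRange_one] at hi
              have h0i : 0 ≤ i := by omega
              rw [show i + 1 - 1 = i from by ring, pyGetD_cons_succ x (y :: t) i h0i,
                  show i = (i - 1) + 1 from by ring, pyGetD_cons_succ x (y :: t) (i - 1) (by omega)]
              rw [show i - 1 + 1 = i from by ring])]
      rw [show (0 : Int) + 1 = 1 from by ring,
          show (t.length : Int) + 1 = (((y :: t).length : Nat) : Int) by simp]
      rw [ih y _]
      have hx1 : PySem.List.pyGetD (x :: y :: t) 1 0 = y := by
        rw [show (1 : Int) = ((1 : Nat) : Int) by norm_num, PySem.List.pyGetD_natCast]; rfl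
      have hx0 : PySem.List.pyGetD (x :: y :: t) 0 0 = x := PySem.List.pyGetD_zero_cons x _ 0
      rw [show (1 : Int) - 1 = 0 by ring, hx1, hx0]
      rfl

-- fold over indices 0..len-3 of hs[i+2]-hs[i]  =  fold max over g2
theorem foldB (l : List Int) : ∀ s : Int,
    (PySem.List.pyRange 0 ((l.length : Int) - 2) 1).foldl
        (fun best i => max best (PySem.List.pyGetD l (i + 2) 0 - PySem.List.pyGetD l i 0)) s
      = (g2 l).foldl max s := by
  induction l using g2.induct with
  | case1 a b c t ih =>
      intro s
      have hlen : (((a :: b :: c :: t).length : Nat) : Int) - 2 = (t.length : Int) + 1 := by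
        simp; push_cast; ring
      rw [hlen, PySem.List.pyRange_one_cons (by omega), List.foldl_cons]
      rw [show ((t.length : Int) + 1) = (t.length : Int) + 1 from rfl,
          show (0 : Int) + 1 = (0 : Int) + 1 from rfl]
      rw [show PySem.List.pyRange (0 + 1) ((t.length : Int) + 1) 1
            = (PySem.List.pyRange 0 (t.length : Int) 1).map (· + 1) from pyRange_shift 0 (t.length : Int),
          List.foldl_map]
      rw [PySem.List.foldl_congr_mem _ _
            (fun m i => max m (PySem.List.pyGetD (b :: c :: t) (i + 2) 0 - PySem.List.pyGetD (b :: c :: t) i 0)) _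
            (by
              intro acc i hi
              rw [PySem.List.mem_pyRange_one] at hi
              have h0i : 0 ≤ i := hi.1
              rw [show i + 1 + 2 = (i + 2) + 1 by ring, pyGetD_cons_succ a (b :: c :: t) (i + 2) (by omega),
                  pyGetD_cons_succ a (b :: c :: t) i h0i])]
      rw [show (t.length : Int) = (((b :: c :: t).length : Nat) : Int) - 2 by simp; push_cast; ring]
      rw [ih]
      have h2 : PySem.List.pyGetD (a :: b :: c :: t) (0 + 2) 0 = c := by
        rw [show (0 : Int) + 2 = ((2 : Nat) : Int) by norm_num, PySem.List.pyGetD_natCast]; rfl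
      have h0 : PySem.List.pyGetD (a :: b :: c :: t) 0 0 = a := PySem.List.pyGetD_zero_cons a _ 0
      rw [h2, h0]
      rfl
  | case2 l h2 =>
      intro s
      have hg : g2 l = [] := by
        cases l with
        | nil => rfl
        | cons a t => cases t with
            | nil => rfl
            | cons b u => cases u with
                | nil => rfl
                | cons c v => exact absurd rfl (h2 a b c v)
      have hlen : l.length ≤ 2 := by
        rcases l with _ | ⟨a, _ | ⟨b, _ | ⟨c, v⟩⟩⟩
        · simp
        · simp
        · simp
        · exact absurd rfl (h2 a b c v)
      rw [hg, PySem.List.pyRange_one_eq_nil (by push_cast; omega)]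
      rfl

theorem getLastD_cons_cons (a b : Int) (l : List Int) (d : Int) :
    (a :: b :: l).getLastD d = (b :: l).getLastD d := by
  simp [List.getLastD_cons]

theorem agaps_append (xs ys : List Int) (hx : xs ≠ []) (hy : ys ≠ []) :
    agaps (xs ++ ys) = agaps xs ++ |ys.headD 0 - xs.getLastD 0| :: agaps ys := by
  induction xs with
  | nil => exact absurd rfl hx
  | cons x xs' ih =>
      cases xs' with
      | nil =>
          cases ys with
          | nil => exact absurd rfl hy
          | cons y ys' => simp [agaps, List.getLastD_cons]
      | cons x2 xs'' =>
          have hih := ih (by simp)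
          simp only [List.cons_append] at hih ⊢
          rw [show agaps (x :: x2 :: (xs'' ++ ys)) = |x2 - x| :: agaps (x2 :: (xs'' ++ ys)) from rfl,
              hih, getLastD_cons_cons,
              show agaps (x :: x2 :: xs'') = |x2 - x| :: agaps (x2 :: xs'') from rfl]
          simp

theorem agaps_reverse (l : List Int) : agaps l.reverse = (agaps l).reverse := by
  induction l with
  | nil => simp [agaps]
  | cons a t ih =>
      cases t with
      | nil => simp [agaps]
      | cons b t' =>
          have hrev : (b :: t').reverse ≠ [] := by simp
          rw [show (a :: b :: t').reverse = (b :: t').reverse ++ [a] by simp]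
          rw [agaps_append _ _ hrev (by simp), ih]
          have hl : ((b :: t').reverse).getLastD 0 = b := by
            simp [List.getLastD_eq_getLast?]
          rw [hl]
          simp [agaps, abs_sub_comm]

theorem agaps_eq_gaps (l : List Int) (h : l.Pairwise (· ≤ ·)) : agaps l = gaps l := by
  induction l using agaps.induct with
  | case1 a b t ih =>
      have hab : a ≤ b := (List.pairwise_cons.1 h).1 _ (by simp)
      rw [agaps, gaps, ih (List.pairwise_cons.1 h).2, abs_of_nonneg (by omega)]
  | case2 l h2 => cases l with
      | nil => simp [agaps, gaps]
      | cons a t => cases t with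
          | nil => simp [agaps, gaps]
          | cons b u => exact absurd rfl (h2 a b u)

theorem g2_perm (l : List Int) : (g2 l).Perm (gaps (eo l) ++ gaps (eo l.tail)) := by
  induction l using g2.induct with
  | case1 a b c t ih =>
      simp only [eo_cons, List.tail_cons] at ih ⊢
      rw [g2]
      rw [show gaps (a :: c :: eo t.tail) = (c - a) :: gaps (c :: eo t.tail) from rfl]
      rw [List.cons_append]
      exact List.Perm.trans (List.Perm.cons _ ih) (List.Perm.cons _ List.perm_append_comm)
  | case2 l h2 => cases l with
      | nil => simp [g2, eo, gaps]
      | cons a t => cases t with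
          | nil => simp [g2, eo, gaps]
          | cons b u => cases u with
              | nil => simp [g2, eo, gaps]
              | cons c v => exact absurd rfl (h2 a b c v)

theorem last_g2_mem (l : List Int) (h : 3 ≤ l.length) :
    l.getLastD 0 - l.getD (l.length - 3) 0 ∈ g2 l := by
  induction l using g2.induct with
  | case1 a b c t ih =>
      cases t with
      | nil => simp [g2, List.getLastD_cons]
      | cons d u =>
          have h3 : 3 ≤ (b :: c :: d :: u).length := by simp
          have := ih h3
          rw [g2]
          refine List.mem_cons_of_mem _ ?_
          have e1 : (a :: b :: c :: d :: u).getLastD 0 = (b :: c :: d :: u).getLastD 0 :=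
            getLastD_cons_cons _ _ _ _
          have e2 : (a :: b :: c :: d :: u).getD ((a :: b :: c :: d :: u).length - 3) 0
              = (b :: c :: d :: u).getD ((b :: c :: d :: u).length - 3) 0 := by
            simp only [List.length_cons,
              show u.length + 1 + 1 + 1 + 1 - 3 = u.length + 1 by omega,
              show u.length + 1 + 1 + 1 - 3 = u.length by omega, List.getD_cons_succ]
          rw [← e1, ← e2] at this
          exact this
  | case2 l h2 => cases l with
      | nil => simp at h
      | cons a t => cases t with
          | nil => simp at h
          | cons b u => cases u with
              | nil => simp at h
              | cons c v => exact absurd rfl (h2 a b c v)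

theorem foldl_max_le {t : List Int} {a x : Int} (ht : ∀ y ∈ t, y ≤ x) (ha : a ≤ x) :
    t.foldl max a ≤ x := by
  rcases PySem.List.foldl_max_mem t a with h | h
  · omega
  · exact ht _ h

theorem foldl_max_perm {t t' : List Int} (hperm : t.Perm t') (a : Int) :
    t.foldl max a = t'.foldl max a := by
  have h1 := PySem.List.le_foldl_max t a
  have h2 := PySem.List.le_foldl_max t' a
  apply le_antisymm
  · exact foldl_max_le (fun y hy => h2.2 y (hperm.mem_iff.mp hy)) h2.1
  · exact foldl_max_le (fun y hy => h1.2 y (hperm.mem_iff.mpr hy)) h1.1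

theorem getLast_eq_getLastD (l : List Int) (h : l ≠ []) (d : Int) :
    l.getLast h = l.getLastD d := by
  rw [List.getLastD_eq_getLast?, List.getLast?_eq_some_getLast h]
  rfl

-- the central fact: on a nonempty sorted list, A's body equals B's body
theorem main (hs : List Int) (hp : hs.Pairwise (· ≤ ·)) (hne : hs ≠ []) :
    abody hs = bbody hs := by
  rcases hs with _ | ⟨h0, t⟩
  · exact absurd rfl hne
  rcases t with _ | ⟨h1, u⟩
  · -- a single guest: both sides are 0
    simp only [abody, bbody]
    rw [arranged_eq h0 []]
    rw [show (eo []).reverse ++ h0 :: eo ([] : List Int).tail = [h0] from rfl]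
    rw [show ((([h0] : List Int).length : Nat) : Int) = 1 by simp,
        PySem.List.pyRange_one_eq_nil (by norm_num)]
    rw [PySem.List.pyGetD_zero_cons, PySem.List.pyGetD_neg_one ([h0] : List Int) 0 (by simp)]
    simp
  -- at least two guests
  have h01 : h0 ≤ h1 := (List.pairwise_cons.1 hp).1 h1 (by simp)
  have hpt : (h1 :: u).Pairwise (· ≤ ·) := (List.pairwise_cons.1 hp).2
  have hpe1 : (eo (h1 :: u)).Pairwise (· ≤ ·) := hpt.sublist (eo_sublist _)
  have hpe2 : (eo (h0 :: h1 :: u)).Pairwise (· ≤ ·) := hp.sublist (eo_sublist _)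
  have heot : eo (h1 :: u) ≠ [] := eo_ne_nil (by simp)
  -- A side: closed form of the arranged array
  have harr := arranged_eq h0 (h1 :: u)
  simp only [List.tail_cons] at harr
  set arr := (eo (h1 :: u)).reverse ++ h0 :: eo u with harrdef
  have harrne : arr ≠ [] := by rw [harrdef]; simp
  have hlen_arr : arr.length = (h0 :: h1 :: u).length := by
    simp only [harrdef, List.length_append, List.length_reverse, List.length_cons, eo_length]
    omega
  obtain ⟨w, ws, hws⟩ : ∃ w ws, arr = w :: ws := by
    rcases h' : arr with _ | ⟨w, ws⟩
    · exact absurd h' harrne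
    · exact ⟨w, ws, rfl⟩
  have hA : abody (h0 :: h1 :: u)
      = (agaps arr).foldl max |arr.getD 0 0 - arr.getLastD 0| := by
    simp only [abody]
    rw [harr]
    rw [show (((h0 :: h1 :: u).length : Nat) : Int) = ((arr.length : Nat) : Int) by rw [hlen_arr]]
    rw [hws, foldA w ws, ← hws]
    rw [PySem.List.pyGetD_zero, PySem.List.pyGetD_neg_one arr 0 harrne,
        getLast_eq_getLastD arr harrne 0]
  -- split agaps arr into the left chain, the two middle gaps, and the right chain
  have hsplit : agaps arr
      = (gaps (eo (h1 :: u))).reverse ++ (h1 - h0) :: gaps (eo (h0 :: h1 :: u)) := by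
    rw [harrdef, agaps_append _ _ (by simp [heot]) (by simp), agaps_reverse]
    have hgl : ((eo (h1 :: u)).reverse).getLastD 0 = h1 := by
      rw [List.getLastD_eq_getLast?, List.getLast?_reverse, eo_cons]
      rfl
    rw [hgl]
    rw [show (h0 :: eo u).headD 0 = h0 from rfl]
    rw [show (h0 :: eo u) = eo (h0 :: h1 :: u) from rfl]
    rw [agaps_eq_gaps _ hpe1, agaps_eq_gaps _ hpe2, abs_sub_comm, abs_of_nonneg (by omega)]
  -- B side
  have hB : bbody (h0 :: h1 :: u) = (g2 (h0 :: h1 :: u)).foldl max (h1 - h0) := by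
    simp only [bbody]
    rw [if_neg (by simp)]
    rw [foldB]
    rw [show PySem.List.pyGetD (h0 :: h1 :: u) 1 0 = h1 by
          rw [show (1 : Int) = ((1 : Nat) : Int) by norm_num, PySem.List.pyGetD_natCast]; rfl,
        PySem.List.pyGetD_zero_cons]
  have hperm := g2_perm (h0 :: h1 :: u)
  simp only [List.tail_cons] at hperm
  have hBp : bbody (h0 :: h1 :: u)
      = (gaps (eo (h0 :: h1 :: u)) ++ gaps (eo (h1 :: u))).foldl max (h1 - h0) := by
    rw [hB, foldl_max_perm hperm]
  -- wrap-around bound: |arr[0] - arr[-1]| never exceeds B's maximum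
  have hW : |arr.getD 0 0 - arr.getLastD 0| ≤ bbody (h0 :: h1 :: u) := by
    have hmono : ∀ i j : Nat, i ≤ j → j < (h0 :: h1 :: u).length →
        (h0 :: h1 :: u).getD i 0 ≤ (h0 :: h1 :: u).getD j 0 := by
      intro i j hij hj
      rcases Nat.eq_or_lt_of_le hij with rfl | hlt
      · exact le_refl _
      · rw [List.getD_eq_getElem _ _ (by omega), List.getD_eq_getElem _ _ hj]
        exact List.pairwise_iff_getElem.1 hp i j (by omega) hj hlt
    have hlenhs : (h0 :: h1 :: u).length = u.length + 2 := by simp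
    have hX : arr.getD 0 0 = (eo (h1 :: u)).getLastD 0 := by
      rw [harrdef]
      rcases h' : (eo (h1 :: u)).reverse with _ | ⟨z, zs⟩
      · exact absurd (by simpa using h') heot
      · rw [List.cons_append, List.getD_cons_zero,
            show z = ((z :: zs).headD 0) from rfl, ← h',
            List.headD_eq_head?, List.head?_reverse, ← List.getLastD_eq_getLast?]
    have hY : arr.getLastD 0 = (eo (h0 :: h1 :: u)).getLastD 0 := by
      rw [harrdef, getLastD_append_right _ _ (by simp)]
      rfl
    have htlen : (h1 :: u).length = u.length + 1 := by simp
    have hgetd : ∀ k : Nat, (h1 :: u).getD k 0 = (h0 :: h1 :: u).getD (k + 1) 0 := by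
      intro k; rw [List.getD_cons_succ]
    have hX2 : arr.getD 0 0 = (h0 :: h1 :: u).getD (u.length + 1) 0
        ∨ arr.getD 0 0 = (h0 :: h1 :: u).getD u.length 0 := by
      rw [hX, eo_getLastD _ (by simp) 0, htlen]
      by_cases hpar : (u.length + 1) % 2 = 1
      · left; rw [if_pos hpar, show u.length + 1 - 1 = u.length from rfl, hgetd]
      · right
        have hN1 : 1 ≤ u.length := by omega
        rw [if_neg hpar, show u.length + 1 - 2 = u.length - 1 from by omega, hgetd,
            show u.length - 1 + 1 = u.length from by omega]
    have hY2 : arr.getLastD 0 = (h0 :: h1 :: u).getD (u.length + 1) 0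
        ∨ arr.getLastD 0 = (h0 :: h1 :: u).getD u.length 0 := by
      rw [hY, eo_getLastD _ (by simp) 0, hlenhs]
      by_cases hpar : (u.length + 2) % 2 = 1
      · left; rw [if_pos hpar, show u.length + 2 - 1 = u.length + 1 by omega]
      · right; rw [if_neg hpar, show u.length + 2 - 2 = u.length by omega]
    have hXb : (h0 :: h1 :: u).getD u.length 0 ≤ arr.getD 0 0
        ∧ arr.getD 0 0 ≤ (h0 :: h1 :: u).getD (u.length + 1) 0 := by
      rcases hX2 with h' | h' <;> rw [h'] <;>
        exact ⟨hmono _ _ (by omega) (by omega), hmono _ _ (by omega) (by omega)⟩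
    have hYb : (h0 :: h1 :: u).getD u.length 0 ≤ arr.getLastD 0
        ∧ arr.getLastD 0 ≤ (h0 :: h1 :: u).getD (u.length + 1) 0 := by
      rcases hY2 with h' | h' <;> rw [h'] <;>
        exact ⟨hmono _ _ (by omega) (by omega), hmono _ _ (by omega) (by omega)⟩
    have hWG : |arr.getD 0 0 - arr.getLastD 0|
        ≤ (h0 :: h1 :: u).getD (u.length + 1) 0 - (h0 :: h1 :: u).getD u.length 0 :=
      abs_sub_le_iff.mpr ⟨by omega, by omega⟩
    rcases Nat.eq_zero_or_pos u.length with hN0 | hN1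
    · -- just two guests: the wrap gap IS the seed h1 - h0
      have hu : u = [] := List.length_eq_zero_iff.mp hN0
      subst hu
      have hseed : (h0 :: h1 :: ([] : List Int)).getD 1 0 - (h0 :: h1 :: ([] : List Int)).getD 0 0
          ≤ bbody (h0 :: h1 :: []) := by
        rw [hB]
        exact (PySem.List.le_foldl_max _ _).1
      simp only [List.length_nil] at hWG
      exact le_trans hWG hseed
    · -- at least three guests: bounded by the last distance-2 gap
      have hmem := last_g2_mem (h0 :: h1 :: u) (by omega)
      have hlast : (h0 :: h1 :: u).getLastD 0 = (h0 :: h1 :: u).getD (u.length + 1) 0 := by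
        rw [getLastD_eq_getD, hlenhs, show u.length + 2 - 1 = u.length + 1 by omega]
      have hidx : (h0 :: h1 :: u).length - 3 = u.length - 1 := by simp
      rw [hlast, hidx] at hmem
      have hgap2 : (h0 :: h1 :: u).getD (u.length + 1) 0 - (h0 :: h1 :: u).getD u.length 0
          ≤ (h0 :: h1 :: u).getD (u.length + 1) 0 - (h0 :: h1 :: u).getD (u.length - 1) 0 := by
        have := hmono (u.length - 1) u.length (by omega) (by simp)
        omega
      have hle : (h0 :: h1 :: u).getD (u.length + 1) 0 - (h0 :: h1 :: u).getD (u.length - 1) 0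
          ≤ bbody (h0 :: h1 :: u) := by
        rw [hB]
        exact (PySem.List.le_foldl_max _ _).2 _ hmem
      omega
  -- assemble by antisymmetry of max over the two candidate lists
  rw [hA, hsplit]
  apply le_antisymm
  · apply foldl_max_le
    · intro y hy
      rcases List.mem_append.1 hy with hy | hy
      · rw [hBp]
        exact (PySem.List.le_foldl_max _ _).2 _
          (List.mem_append_right _ (List.mem_reverse.1 hy))
      · rcases List.mem_cons.1 hy with rfl | hy
        · rw [hBp]; exact (PySem.List.le_foldl_max _ _).1
        · rw [hBp]
          exact (PySem.List.le_foldl_max _ _).2 _ (List.mem_append_left _ hy)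
    · exact hW
  · rw [hBp]
    apply foldl_max_le
    · intro y hy
      rcases List.mem_append.1 hy with hy | hy
      · exact (PySem.List.le_foldl_max _ _).2 _
          (List.mem_append_right _ (List.mem_cons_of_mem _ hy))
      · exact (PySem.List.le_foldl_max _ _).2 _
          (List.mem_append_left _ (List.mem_reverse.2 hy))
    · exact (PySem.List.le_foldl_max _ _).2 _ (List.mem_append_right _ (List.mem_cons_self))

-- ===== VERDICT (by name: the statement is the Claim_ definition above) =====
theorem max_height_difference_spec : Claim_equal_max_height_difference := by
  intro heights _ hpre
  unfold Spec_max_height_difference max_height_difference max_height_difference_alt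
  exact main _ (PySem.List.sorted_pairwise heights (fun x => x) ) (by
    simpa [PySem.List.sorted_eq_nil_iff] using hpre)
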